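-- pv_equiv track=rewrite | github.com/behlerbg/RDP-Solutions | Scripts/335_CribbageShowScoring.py | scoreValueRunKind
-- ===== SOURCE A (Python) =====
-- import random, itertools
--
-- def scoreValueRunKind(fullHand):
--     '''This will return an int score from fullHand utilizing
--     itertools powerset. Any number of cards adding up to 15, 2 pts.
--     Runs of 3, 4, or 5 cards; 3, 4, 5 pts respectively.
--     2, 3, or 4 of a kind; 2, 6, 12 pts respectively.
--     '''
--     score = 0
--     valueHand = fullHand.copy()
--
--     # converts cards to point values
--     for i in range(len(valueHand)):
--         valueHand[i] = (valueHand[i] % 13) + 1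
--     valueHand.sort()
--
--     # if no run after third card, skip
--     cardNum = 0
--     while cardNum < 3:
--         card = valueHand[cardNum]
--         if card + 1 in valueHand:
--             if card + 2 in valueHand:
--                 if card + 3 in valueHand:
--                     if card + 4 in valueHand:
--                         score += 5
--                         break
--                     else:
--                         score += 4
--                         break
--                 else:
--                     score += 3
--                     break
--             else:
--                 cardNum += 1
--         else:
--             cardNum += 1
--
--     # find a kind
--     uniques = []
--     for card in valueHand:
--         if card not in uniques:
--             uniques.append(card)
--
--     for card in uniques:
--         kind = 0
--         kind = valueHand.count(card)
--         if kind == 4: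
--             score += 12
--             break
--         elif kind == 3:
--             score += 6
--         elif kind == 2:
--             score += 2
--
--
--     for i in range(len(valueHand)):
--         if valueHand[i] > 10:
--             valueHand[i] = 10
--
--     # creates itertools object
--     powerValueHand = itertools.chain.from_iterable(itertools.combinations(valueHand, r) for r in range(len(valueHand)
--                                                                                                        + 1))
--
--     # run through all combinations of cards
--     for i in powerValueHand:
--
--         # if the cards add up to 15, 2 pts
--         if sum(i) == 15:
--             score += 2
--
--     return score
-- ===== SOURCE B (Python) =====
-- def scoreValueRunKind(fullHand):
--     '''Same score as the original, but counts fifteens with a bounded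
--     subset-sum DP table instead of enumerating the whole powerset.'''
--     vals = sorted((c % 13) + 1 for c in fullHand)
--     score = 0
--
--     # run: for each of the first three sorted cards, measure the
--     # consecutive chain starting there (capped at 5); score the first chain >= 3
--     for v in vals[:3]:
--         L = 1
--         while L < 5 and v + L in vals:
--             L += 1
--         if L >= 3:
--             score += L
--             break
--
--     # kinds: one counting pass, then score each distinct value once
--     counts = {}
--     for v in vals:
--         counts[v] = counts.get(v, 0) + 1
--     for c in counts.values():
--         if c == 4:
--             score += 12
--             break
--         score += 2 if c == 2 else 6 if c == 3 else 0
--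
--     # fifteens: dp[s] = number of sub-multisets of the capped values summing to s
--     dp = [1] + [0] * 15
--     for v in vals:
--         w = v if v <= 10 else 10
--         dp = [dp[s] + (dp[s - w] if s >= w else 0) for s in range(16)]
--     return score + 2 * dp[15]
-- ===== Notes on version B (the rewrite author's own statement) =====
-- stated objective: faster
-- what changed: The fifteens pass enumerates no powerset: a 16-entry subset-sum DP table counts the subsets summing to 15 in one pass; the kinds pass uses a single counting dict instead of dedup-then-count rescans, and the run pass measures the consecutive chain from each of the first three sorted cards instead of the nested membership ifs.
import Mathlib
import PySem

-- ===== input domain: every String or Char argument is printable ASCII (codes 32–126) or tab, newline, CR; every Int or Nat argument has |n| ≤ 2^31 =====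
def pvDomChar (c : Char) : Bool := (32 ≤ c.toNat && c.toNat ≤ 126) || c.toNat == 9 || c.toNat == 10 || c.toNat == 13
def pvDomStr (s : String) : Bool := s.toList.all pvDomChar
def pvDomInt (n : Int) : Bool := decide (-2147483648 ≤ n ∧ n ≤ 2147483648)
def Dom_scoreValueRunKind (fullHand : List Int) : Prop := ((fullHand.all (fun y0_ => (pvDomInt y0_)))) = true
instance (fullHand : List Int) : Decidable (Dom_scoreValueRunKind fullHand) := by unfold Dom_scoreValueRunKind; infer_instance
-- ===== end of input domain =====

-- B replaces A's exponential powerset fifteens pass by a 16-entry subset-sum DP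
-- (and a counting dict for kinds, a chain-length scan for the run): faster.
-- A mutates nothing observable; equivalence is about the return value.

-- ===== PORT A =====
-- the 'while cardNum < 3' run loop; pyGetD is total, Pre_ excludes the hands
-- (length < 3) on which Python raises IndexError here
def pvARun (vh : List Int) (cardNum : Nat) : Int :=
  if cardNum < 3 then
    let card := PySem.List.pyGetD vh (cardNum : Int) 0
    if (card + 1) ∈ vh then
      if (card + 2) ∈ vh then
        if (card + 3) ∈ vh then
          if (card + 4) ∈ vh then 5 else 4
        else 3
      else pvARun vh (cardNum + 1)
    else pvARun vh (cardNum + 1)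
  else 0
termination_by 3 - cardNum

-- the 'for card in uniques' loop with its break on four of a kind
def pvAKind (vh : List Int) : List Int → Int
  | [] => 0
  | c :: rest =>
    let kind := PySem.List.count vh c
    if kind = 4 then 12
    else (if kind = 3 then 6 else if kind = 2 then 2 else 0) + pvAKind vh rest

-- the powerset loop: itertools.combinations for r = 0..n enumerates every
-- index-subsequence exactly once, i.e. the same multiset as List.sublists,
-- and the loop only counts (order-insensitive), so sublists is an exact port
def pvAFifteens (capped : List Int) : Int :=
  capped.sublists.foldl (fun acc sub => if sub.sum = 15 then acc + 2 else acc) 0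

def scoreValueRunKind (fullHand : List Int) : Int :=
  let valueHand := fullHand.map (fun v => PySem.Int.mod v 13 + 1)
  let valueHand := PySem.List.sorted valueHand (fun x => x) false
  let runScore := pvARun valueHand 0
  let uniques := valueHand.foldl (fun u c => if c ∈ u then u else u ++ [c]) []
  let kindScore := pvAKind valueHand uniques
  let capped := valueHand.map (fun v => if v > 10 then (10 : Int) else v)
  runScore + kindScore + pvAFifteens capped

-- ===== PORT B =====
-- 'L = 1; while L < 5 and v + L in vals: L += 1'
-- (the fuel argument, 4 at the call site, only bounds the ≤ 4 iterations of
--  the while loop so the recursion is structural; with fuel 0, L is already 5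
--  and the loop condition is false anyway)
def pvBChain (vals : List Int) (v : Int) : Nat → Nat → Nat
  | 0, L => L
  | fuel + 1, L => if L < 5 ∧ (v + (L : Int)) ∈ vals then pvBChain vals v fuel (L + 1) else L

-- 'for v in vals[:3]: … break' (first arg = vals for membership, second = the slice)
def pvBRun (vals : List Int) : List Int → Int
  | [] => 0
  | v :: rest =>
    let L := pvBChain vals v 4 1
    if 3 ≤ L then (L : Int) else pvBRun vals rest

-- 'for c in counts.values(): …'
def pvBKind : List Int → Int
  | [] => 0
  | c :: rest =>
    if c = 4 then 12
    else (if c = 2 then 2 else if c = 3 then 6 else 0) + pvBKind rest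

-- 'dp = [dp[s] + (dp[s - w] if s >= w else 0) for s in range(16)]'
def pvBStep (dp : List Int) (w : Int) : List Int :=
  (List.range 16).map (fun s => dp.getD s 0 + if w ≤ (s : Int) then dp.getD ((s : Int) - w).toNat 0 else 0)

def scoreValueRunKind_alt (fullHand : List Int) : Int :=
  let vals := PySem.List.sorted (fullHand.map (fun c => PySem.Int.mod c 13 + 1)) (fun x => x) false
  let runScore := pvBRun vals (PySem.List.slice vals none (some 3))
  let counts := vals.foldl (fun d v => d.insert v (d.getD v 0 + 1)) PySem.Dict.empty
  let kindScore := pvBKind counts.values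
  let dp := vals.foldl (fun dp v => pvBStep dp (if v ≤ 10 then v else 10)) (1 :: List.replicate 15 0)
  runScore + kindScore + 2 * dp.getD 15 0

-- ===== PRECONDITION & SPEC =====
-- A's run loop unconditionally indexes valueHand[0..2]: on hands with fewer
-- than 3 cards Python raises IndexError, so those inputs are excluded.
def Pre_scoreValueRunKind (fullHand : List Int) : Prop := 3 ≤ fullHand.length
instance (fullHand : List Int) : Decidable (Pre_scoreValueRunKind fullHand) := by unfold Pre_scoreValueRunKind; infer_instance
def pvWitness_scoreValueRunKind : List Int := [0, 13, 5, 44]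

def Spec_scoreValueRunKind (fullHand : List Int) (out : Int) : Prop := out = scoreValueRunKind_alt fullHand
instance (fullHand : List Int) (out : Int) : Decidable (Spec_scoreValueRunKind fullHand out) := by unfold Spec_scoreValueRunKind; infer_instance

-- ===== CLAIM (what is proved, stated in full; the proofs are below) =====
def Claim_equal_scoreValueRunKind : Prop := ∀ (fullHand : List Int), Dom_scoreValueRunKind fullHand → Pre_scoreValueRunKind fullHand → Spec_scoreValueRunKind fullHand (scoreValueRunKind fullHand)

-- ===== LEMMAS AND PROOFS =====

-- closed form of B's while loop
theorem pvBChain_eq (vals : List Int) (v : Int) :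
    pvBChain vals v 4 1 =
      (if (v + 1) ∈ vals then if (v + 2) ∈ vals then if (v + 3) ∈ vals then
        (if (v + 4) ∈ vals then 5 else 4) else 3 else 2 else 1) := by
  by_cases h1 : (v + 1) ∈ vals <;> by_cases h2 : (v + 2) ∈ vals <;>
    by_cases h3 : (v + 3) ∈ vals <;> by_cases h4 : (v + 4) ∈ vals <;>
      simp [pvBChain, h1, h2, h3, h4]

-- one card of the run pass: A's nested ifs vs B's chain length (same fallthrough value)
theorem pvRun_step (vals : List Int) (v cont : Int) :
    (if (v + 1) ∈ vals then
      if (v + 2) ∈ vals then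
        (if (v + 3) ∈ vals then if (v + 4) ∈ vals then (5 : Int) else 4 else 3)
      else cont
    else cont)
    = (if 3 ≤ pvBChain vals v 4 1 then ((pvBChain vals v 4 1 : Nat) : Int) else cont) := by
  rw [pvBChain_eq]
  by_cases h1 : (v + 1) ∈ vals <;> by_cases h2 : (v + 2) ∈ vals <;>
    by_cases h3 : (v + 3) ∈ vals <;> by_cases h4 : (v + 4) ∈ vals <;>
      simp [h1, h2, h3, h4]

theorem pvRunList (vals : List Int) (cs : List Int) : ∀ (k : Nat), k + cs.length = 3 →
    (∀ i (h : i < cs.length), PySem.List.pyGetD vals ((k + i : Nat) : Int) 0 = cs[i]) →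
    pvARun vals k = pvBRun vals cs := by
  induction cs with
  | nil =>
    intro k hk _
    rw [pvARun, if_neg (by simp at hk; omega)]
    rfl
  | cons v cs' ih =>
    intro k hk hget
    have hk3 : k < 3 := by simp at hk; omega
    have hv : PySem.List.pyGetD vals ((k : Nat) : Int) 0 = v := by simpa using hget 0 (by simp)
    have hrec : pvARun vals (k + 1) = pvBRun vals cs' := by
      refine ih (k + 1) (by simp at hk ⊢; omega) (fun i hi => ?_)
      have := hget (i + 1) (by simpa using Nat.succ_lt_succ hi)
      simpa [Nat.add_assoc, Nat.add_comm 1 i] using this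
    rw [pvARun, if_pos hk3]
    simp only [hv, hrec]
    rw [pvRun_step vals v (pvBRun vals cs')]
    rfl

-- the kinds loops agree when fed A's counts
theorem pvKind_eq (vh : List Int) (l : List Int) :
    pvAKind vh l = pvBKind (l.map (fun k => (vh.count k : Int))) := by
  induction l with
  | nil => rfl
  | cons c rest ih =>
    rw [pvAKind, List.map_cons, pvBKind]
    simp only [PySem.List.count_eq, ih]
    have e4 : ((vh.count c : Int) = 4) ↔ vh.count c = 4 := by omega
    have e3 : ((vh.count c : Int) = 3) ↔ vh.count c = 3 := by omega
    have e2 : ((vh.count c : Int) = 2) ↔ vh.count c = 2 := by omega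
    simp only [e4, e3, e2]
    split_ifs <;> first | rfl | omega

-- number of sublists with a given sum
def pvCnt (l : List Int) (s : Int) : Nat := l.sublists.countP (fun t => t.sum == s)

theorem pvCnt_nil (s : Int) : pvCnt [] s = if s = 0 then 1 else 0 := by
  by_cases h : s = 0 <;> simp [pvCnt, h]
  · exact fun hh => h hh.symm

theorem pvCnt_concat (l : List Int) (x s : Int) :
    pvCnt (l ++ [x]) s = pvCnt l s + pvCnt l (s - x) := by
  simp [pvCnt, List.sublists_concat, List.countP_append, List.countP_map, Function.comp_def]
  congr 1
  funext t
  have h : (t.sum + x = s) ↔ (t.sum = s - x) := by omega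
  simp [h]

theorem pvCnt_neg (l : List Int) (s : Int) (hpos : ∀ x ∈ l, 0 ≤ x) (hs : s < 0) :
    pvCnt l s = 0 := by
  simp [pvCnt, List.countP_eq_zero]
  intro t ht hsum
  have : 0 ≤ t.sum := List.sum_nonneg (fun x hx => hpos x (ht.subset hx))
  omega

-- the DP invariant: after folding pvBStep over l, slot s holds pvCnt l s
theorem pvDP_inv (l : List Int) (hpos : ∀ x ∈ l, 0 ≤ x) :
    ∀ s : Nat, s < 16 →
      (l.foldl pvBStep (1 :: List.replicate 15 0)).getD s 0 = (pvCnt l s : Int) := by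
  induction l using List.reverseRecOn with
  | nil =>
    intro s hs
    rw [pvCnt_nil]
    interval_cases s <;> simp
  | append_singleton l x ih =>
    have hposl : ∀ y ∈ l, (0:Int) ≤ y := fun y hy => hpos y (by simp [hy])
    have hx : (0:Int) ≤ x := hpos x (by simp)
    intro s hs
    rw [List.foldl_concat, pvBStep, PySem.List.getD_map_range _ 16 s 0 hs, pvCnt_concat]
    by_cases hxs : x ≤ (s : Int)
    · have hlt : ((s : Int) - x).toNat < 16 := by omega
      have hcast : ((((s : Int) - x).toNat : Nat) : Int) = (s : Int) - x := by omega
      rw [if_pos hxs, ih hposl s hs, ih hposl _ hlt, hcast]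
      push_cast
      ring
    · have : pvCnt l ((s : Int) - x) = 0 := pvCnt_neg l _ hposl (by omega)
      rw [if_neg hxs, ih hposl s hs, this]
      simp
-- A's counting fold over the powerset
theorem pvAFifteens_eq (capped : List Int) :
    pvAFifteens capped = 2 * (pvCnt capped 15 : Int) := by
  unfold pvAFifteens pvCnt
  have : ∀ (ls : List (List Int)) (c : Int),
      ls.foldl (fun acc sub => if sub.sum = 15 then acc + 2 else acc) c
        = c + 2 * (ls.countP (fun t => t.sum == 15) : Int) := by
    intro ls
    induction ls with
    | nil => intro c; simp
    | cons t rest ih =>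
      intro c
      by_cases h : t.sum = 15
      · simp [h, ih]
        push_cast
        ring
      · simp [h, ih]
  rw [this]; ring

-- ===== VERDICT (by name: the statement is the Claim_ definition above) =====
theorem scoreValueRunKind_spec : Claim_equal_scoreValueRunKind := by
  intro fullHand _ hpre
  unfold Pre_scoreValueRunKind at hpre
  simp only [Spec_scoreValueRunKind, scoreValueRunKind, scoreValueRunKind_alt]
  set vals := PySem.List.sorted (fullHand.map (fun v => PySem.Int.mod v 13 + 1)) (fun x => x) false with hvals
  have hlen : 3 ≤ vals.length := by
    rw [hvals, PySem.List.length_sorted, List.length_map]; exact hpre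
  have hrun : pvARun vals 0 = pvBRun vals (PySem.List.slice vals none (some 3)) := by
    have hslice : PySem.List.slice vals none (some 3) = vals.take 3 := by
      simpa using PySem.List.slice_to (xs := vals) (b := 3) (by norm_num)
    rw [hslice]
    refine pvRunList vals (vals.take 3) 0 (by simp [List.length_take]; omega) ?_
    intro i hi
    have hi' : i < vals.length := by simp [List.length_take] at hi; omega
    rw [PySem.List.pyGetD_natCast, List.getD_eq_getElem _ _ (by simpa using hi')]
    simp [List.getElem_take]
  have hkind : pvAKind vals (vals.foldl (fun u c => if c ∈ u then u else u ++ [c]) []) =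
      pvBKind (vals.foldl (fun d v => d.insert v (d.getD v 0 + 1)) PySem.Dict.empty).values := by
    have hu : (vals.foldl (fun u c => if c ∈ u then u else u ++ [c]) []) = PySem.Set.ofList vals := by
      rw [PySem.Set.ofList_eq_foldl]
      congr 1
      funext u x
      rw [PySem.Set.add_eq_ite]
    have hc : (vals.foldl (fun d v => d.insert v (d.getD v 0 + 1)) PySem.Dict.empty) = PySem.Dict.counter vals :=
      PySem.Dict.foldl_insert_getD_add_one_eq_counter vals
    have hval : (PySem.Dict.counter vals).values = (PySem.Set.ofList vals).map (fun k => (vals.count k : Int)) := by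
      simp [PySem.Dict.values, PySem.Dict.items_counter]
    rw [hu, hc, hval, ← pvKind_eq]
  have hfif : pvAFifteens (vals.map (fun v => if v > 10 then (10 : Int) else v)) =
      2 * (vals.foldl (fun dp v => pvBStep dp (if v ≤ 10 then v else 10)) (1 :: List.replicate 15 0)).getD 15 0 := by
    have hcapfun : (fun v : Int => if v > 10 then (10 : Int) else v) = (fun v => if v ≤ 10 then v else 10) := by
      funext v; split_ifs <;> omega
    set capped := vals.map (fun v : Int => if v ≤ 10 then v else 10) with hcap
    have hfold : vals.foldl (fun dp v => pvBStep dp (if v ≤ 10 then v else 10)) (1 :: List.replicate 15 0)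
        = capped.foldl pvBStep (1 :: List.replicate 15 0) := by
      rw [hcap, List.foldl_map]
    have hpos : ∀ x ∈ capped, (0 : Int) ≤ x := by
      intro x hx
      rw [hcap] at hx
      simp only [List.mem_map] at hx
      obtain ⟨v, hv, hvx⟩ := hx
      rw [hvals, PySem.List.mem_sorted, List.mem_map] at hv
      obtain ⟨c, _, hc⟩ := hv
      have hm := PySem.Int.mod_nonneg (a := c) (b := 13) (by norm_num)
      subst hvx
      rw [← hc]
      split_ifs <;> omega
    have hdp := pvDP_inv capped hpos 15 (by norm_num)
    rw [hcapfun, hfold, pvAFifteens_eq, hdp]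
    norm_num
    rw [hcap]
  rw [hrun, hkind, hfif]
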